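-- pv_equiv track=rewrite | github.com/tercumantanumut/seline | comfyui_backend/deeployd-comfy/src/containers/build_optimizer.py | optimize_copy_order
-- ===== SOURCE A (Python) =====
-- def optimize_copy_order(copies: list[str]) -> list[str]:
--     """Optimize COPY instruction order for better caching.
--
--     Args:
--         copies: List of COPY commands
--
--     Returns:
--         Optimized order
--     """
--     # Sort by likelihood of change (less likely to change first)
--     config_files = []
--     dependency_files = []
--     source_files = []
--     other_files = []
--
--     for copy in copies:
--         if any(
--             f in copy
--             for f in ["requirements.txt", "package.json", "Gemfile", "go.mod"]
--         ):
--             dependency_files.append(copy)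
--         elif any(f in copy for f in [".yaml", ".yml", ".json", ".toml", "config"]):
--             config_files.append(copy)
--         elif any(f in copy for f in ["src/", "app/", "lib/"]):
--             source_files.append(copy)
--         else:
--             other_files.append(copy)
--
--     # Order: dependencies -> config -> other -> source (most likely to change)
--     return dependency_files + config_files + other_files + source_files
-- ===== SOURCE B (Python) =====
-- def optimize_copy_order(copies: list[str]) -> list[str]:
--     """Optimize COPY instruction order for better caching (rank + stable sort)."""
--
--     def _rank(copy: str) -> int:
--         if any(f in copy for f in ["requirements.txt", "package.json", "Gemfile", "go.mod"]):
--             return 0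
--         if any(f in copy for f in [".yaml", ".yml", ".json", ".toml", "config"]):
--             return 1
--         if any(f in copy for f in ["src/", "app/", "lib/"]):
--             return 3
--         return 2
--
--     return sorted(copies, key=_rank)
-- ===== Notes on version B (the rewrite author's own statement) =====
-- stated objective: simpler
-- what changed: Replaces the four-bucket partition-and-concatenate loop by a single integer rank function (dependency=0, config=1, other=2, source=3 with the same precedence) and one stable sorted() call.
import Mathlib
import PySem

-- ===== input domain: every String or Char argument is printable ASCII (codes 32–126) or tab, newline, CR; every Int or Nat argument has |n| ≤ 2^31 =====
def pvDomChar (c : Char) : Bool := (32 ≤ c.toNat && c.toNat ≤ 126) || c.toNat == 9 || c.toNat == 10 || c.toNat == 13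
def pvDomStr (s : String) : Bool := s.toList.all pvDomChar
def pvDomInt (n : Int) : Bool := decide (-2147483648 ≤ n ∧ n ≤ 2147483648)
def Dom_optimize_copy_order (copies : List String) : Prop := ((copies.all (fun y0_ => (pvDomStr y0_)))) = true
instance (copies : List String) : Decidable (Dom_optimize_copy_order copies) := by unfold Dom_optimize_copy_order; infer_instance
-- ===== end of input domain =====

-- B replaces A's four-bucket partition loop by a rank function and one stable sort (objective: simpler).

-- ===== PORT A =====
def optimize_copy_order (copies : List String) : List String :=
  let st := copies.foldl
    (fun (st : List String × List String × List String × List String) copy =>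
      let (config_files, dependency_files, source_files, other_files) := st
      if ["requirements.txt", "package.json", "Gemfile", "go.mod"].any
          (fun f => PySem.Str.isIn f copy) then
        (config_files, dependency_files ++ [copy], source_files, other_files)
      else if [".yaml", ".yml", ".json", ".toml", "config"].any
          (fun f => PySem.Str.isIn f copy) then
        (config_files ++ [copy], dependency_files, source_files, other_files)
      else if ["src/", "app/", "lib/"].any (fun f => PySem.Str.isIn f copy) then
        (config_files, dependency_files, source_files ++ [copy], other_files)
      else
        (config_files, dependency_files, source_files, other_files ++ [copy]))
    ([], [], [], [])
  st.2.1 ++ st.1 ++ st.2.2.2 ++ st.2.2.1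

-- ===== PORT B =====
def pvRank (copy : String) : Int :=
  if ["requirements.txt", "package.json", "Gemfile", "go.mod"].any
      (fun f => PySem.Str.isIn f copy) then 0
  else if [".yaml", ".yml", ".json", ".toml", "config"].any
      (fun f => PySem.Str.isIn f copy) then 1
  else if ["src/", "app/", "lib/"].any (fun f => PySem.Str.isIn f copy) then 3
  else 2

def optimize_copy_order_alt (copies : List String) : List String :=
  PySem.List.sorted copies pvRank

-- ===== PRECONDITION & SPEC =====
def Spec_optimize_copy_order (copies : List String) (out : List String) : Prop := out = optimize_copy_order_alt copies
instance (copies : List String) (out : List String) : Decidable (Spec_optimize_copy_order copies out) := by unfold Spec_optimize_copy_order; infer_instance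

-- ===== CLAIM (what is proved, stated in full; the proofs are below) =====
def Claim_equal_optimize_copy_order : Prop := ∀ (copies : List String), Dom_optimize_copy_order copies → Spec_optimize_copy_order copies (optimize_copy_order copies)

-- ===== LEMMAS AND PROOFS =====

lemma pvRank_cases (c : String) : pvRank c = 0 ∨ pvRank c = 1 ∨ pvRank c = 2 ∨ pvRank c = 3 := by
  unfold pvRank; split_ifs <;> simp

lemma insertBy_cons_false {α : Type} (before : α → α → Bool) (x y : α) (t : List α)
    (h : before x y = false) :
    PySem.List.insertBy before x (y :: t) = y :: PySem.List.insertBy before x t := by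
  simp [PySem.List.insertBy, h]

lemma insertBy_all_before {α : Type} (before : α → α → Bool) (x : α) (t : List α)
    (h : ∀ y ∈ t, before x y = true) :
    PySem.List.insertBy before x t = x :: t := by
  cases t with
  | nil => simp [PySem.List.insertBy]
  | cons y ys => simp [PySem.List.insertBy, h y (List.mem_cons_self)]

lemma insertBy_append_not_before {α : Type} (before : α → α → Bool) (x : α) (l r : List α)
    (h : ∀ y ∈ l, before x y = false) :
    PySem.List.insertBy before x (l ++ r) = l ++ PySem.List.insertBy before x r := by
  induction l with
  | nil => simp
  | cons y t ih =>
    have hy : before x y = false := h y (List.mem_cons_self)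
    simp [insertBy_cons_false before x y _ hy, ih (fun z hz => h z (List.mem_cons_of_mem _ hz))]

-- invariant for B's insertion sort: blocks of ranks 0,1,2,3 stay blocks
lemma sorted_blocks (xs : List String) : ∀ (a0 a1 a2 a3 : List String),
    (∀ y ∈ a0, pvRank y = 0) → (∀ y ∈ a1, pvRank y = 1) →
    (∀ y ∈ a2, pvRank y = 2) → (∀ y ∈ a3, pvRank y = 3) →
    xs.foldl (fun acc x => PySem.List.insertBy (fun a b => decide (pvRank a < pvRank b)) x acc)
        (a0 ++ (a1 ++ (a2 ++ a3)))
      = (a0 ++ xs.filter (fun c => pvRank c == 0)) ++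
        ((a1 ++ xs.filter (fun c => pvRank c == 1)) ++
         ((a2 ++ xs.filter (fun c => pvRank c == 2)) ++
          (a3 ++ xs.filter (fun c => pvRank c == 3)))) := by
  induction xs with
  | nil => intro a0 a1 a2 a3 _ _ _ _; simp
  | cons x xs ih =>
    intro a0 a1 a2 a3 h0 h1 h2 h3
    simp only [List.foldl_cons]
    rcases pvRank_cases x with hx | hx | hx | hx
    · have e : PySem.List.insertBy (fun a b => decide (pvRank a < pvRank b)) x
          (a0 ++ (a1 ++ (a2 ++ a3))) = (a0 ++ [x]) ++ (a1 ++ (a2 ++ a3)) := by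
        rw [insertBy_append_not_before _ _ _ _ (fun y hy => by simp [hx, h0 y hy])]
        rw [insertBy_all_before _ _ _ (fun y hy => by
          rcases List.mem_append.1 hy with hy | hy
          · simp [hx, h1 y hy]
          · rcases List.mem_append.1 hy with hy | hy
            · simp [hx, h2 y hy]
            · simp [hx, h3 y hy])]
        simp
      rw [e]
      rw [ih (a0 ++ [x]) a1 a2 a3
        (fun y hy => by rcases List.mem_append.1 hy with hy | hy
                        · exact h0 y hy
                        · simp at hy; simpa [hy] using hx) h1 h2 h3]
      simp [hx]
    · have e : PySem.List.insertBy (fun a b => decide (pvRank a < pvRank b)) x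
          (a0 ++ (a1 ++ (a2 ++ a3))) = a0 ++ ((a1 ++ [x]) ++ (a2 ++ a3)) := by
        rw [insertBy_append_not_before _ _ _ _ (fun y hy => by simp [hx, h0 y hy])]
        rw [insertBy_append_not_before _ _ _ _ (fun y hy => by simp [hx, h1 y hy])]
        rw [insertBy_all_before _ _ _ (fun y hy => by
          rcases List.mem_append.1 hy with hy | hy
          · simp [hx, h2 y hy]
          · simp [hx, h3 y hy])]
        simp
      rw [e]
      rw [ih a0 (a1 ++ [x]) a2 a3 h0
        (fun y hy => by rcases List.mem_append.1 hy with hy | hy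
                        · exact h1 y hy
                        · simp at hy; simpa [hy] using hx) h2 h3]
      simp [hx]
    · have e : PySem.List.insertBy (fun a b => decide (pvRank a < pvRank b)) x
          (a0 ++ (a1 ++ (a2 ++ a3))) = a0 ++ (a1 ++ ((a2 ++ [x]) ++ a3)) := by
        rw [insertBy_append_not_before _ _ _ _ (fun y hy => by simp [hx, h0 y hy])]
        rw [insertBy_append_not_before _ _ _ _ (fun y hy => by simp [hx, h1 y hy])]
        rw [insertBy_append_not_before _ _ _ _ (fun y hy => by simp [hx, h2 y hy])]
        rw [insertBy_all_before _ _ _ (fun y hy => by simp [hx, h3 y hy])]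
        simp
      rw [e]
      rw [ih a0 a1 (a2 ++ [x]) a3 h0 h1
        (fun y hy => by rcases List.mem_append.1 hy with hy | hy
                        · exact h2 y hy
                        · simp at hy; simpa [hy] using hx) h3]
      simp [hx]
    · have e : PySem.List.insertBy (fun a b => decide (pvRank a < pvRank b)) x
          (a0 ++ (a1 ++ (a2 ++ a3))) = a0 ++ (a1 ++ (a2 ++ (a3 ++ [x]))) := by
        rw [PySem.List.insertBy_of_forall_not_before _ _ _ (fun y hy => by
          rcases List.mem_append.1 hy with hy | hy
          · simp [hx, h0 y hy]
          · rcases List.mem_append.1 hy with hy | hy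
            · simp [hx, h1 y hy]
            · rcases List.mem_append.1 hy with hy | hy
              · simp [hx, h2 y hy]
              · simp [hx, h3 y hy])]
        simp
      rw [e]
      rw [ih a0 a1 a2 (a3 ++ [x]) h0 h1 h2
        (fun y hy => by rcases List.mem_append.1 hy with hy | hy
                        · exact h3 y hy
                        · simp at hy; simpa [hy] using hx)]
      simp [hx]

lemma alt_eq_filters (copies : List String) :
    optimize_copy_order_alt copies
      = copies.filter (fun c => pvRank c == 0) ++
        (copies.filter (fun c => pvRank c == 1) ++
         (copies.filter (fun c => pvRank c == 2) ++
          copies.filter (fun c => pvRank c == 3))) := by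
  unfold optimize_copy_order_alt
  rw [PySem.List.sorted_eq_foldl_insertBy]
  have := sorted_blocks copies [] [] [] []
    (by simp) (by simp) (by simp) (by simp)
  simpa using this

-- invariant for A's partitioning loop, phrased through pvRank
lemma loop_eq_filters (xs : List String) : ∀ (cfg dep src oth : List String),
    xs.foldl
      (fun (st : List String × List String × List String × List String) copy =>
        let (config_files, dependency_files, source_files, other_files) := st
        if ["requirements.txt", "package.json", "Gemfile", "go.mod"].any
            (fun f => PySem.Str.isIn f copy) then
          (config_files, dependency_files ++ [copy], source_files, other_files)
        else if [".yaml", ".yml", ".json", ".toml", "config"].any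
            (fun f => PySem.Str.isIn f copy) then
          (config_files ++ [copy], dependency_files, source_files, other_files)
        else if ["src/", "app/", "lib/"].any (fun f => PySem.Str.isIn f copy) then
          (config_files, dependency_files, source_files ++ [copy], other_files)
        else
          (config_files, dependency_files, source_files, other_files ++ [copy]))
      (cfg, dep, src, oth)
      = (cfg ++ xs.filter (fun c => pvRank c == 1),
         dep ++ xs.filter (fun c => pvRank c == 0),
         src ++ xs.filter (fun c => pvRank c == 3),
         oth ++ xs.filter (fun c => pvRank c == 2)) := by
  induction xs with
  | nil => intro cfg dep src oth; simp
  | cons x xs ih =>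
    intro cfg dep src oth
    simp only [List.foldl_cons]
    by_cases hd : ["requirements.txt", "package.json", "Gemfile", "go.mod"].any
        (fun f => PySem.Str.isIn f x) = true
    · have hr : pvRank x = 0 := by unfold pvRank; rw [if_pos hd]
      simp only [hd, if_true]
      rw [ih]
      simp [hr]
    · by_cases hc : [".yaml", ".yml", ".json", ".toml", "config"].any
          (fun f => PySem.Str.isIn f x) = true
      · have hr : pvRank x = 1 := by unfold pvRank; rw [if_neg hd, if_pos hc]
        simp only [hd, hc, if_true]
        rw [ih]
        simp [hr]
      · by_cases hs : ["src/", "app/", "lib/"].any (fun f => PySem.Str.isIn f x) = true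
        · have hr : pvRank x = 3 := by unfold pvRank; rw [if_neg hd, if_neg hc, if_pos hs]
          simp only [hd, hc, hs, if_true]
          rw [ih]
          simp [hr]
        · have hr : pvRank x = 2 := by unfold pvRank; rw [if_neg hd, if_neg hc, if_neg hs]
          simp only [hd, hc, hs]
          rw [ih]
          simp [hr]

-- ===== VERDICT (by name: the statement is the Claim_ definition above) =====
theorem optimize_copy_order_spec : Claim_equal_optimize_copy_order := by
  intro copies _
  unfold Spec_optimize_copy_order optimize_copy_order
  rw [loop_eq_filters copies [] [] [] [], alt_eq_filters copies]
  simp
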